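-- pv_equiv track=rewrite | github.com/arnabRoy21/Natural-Language-Processing | HMM/utils.py | assign_unk
-- ===== SOURCE A (Python) =====
-- import string
--
-- punct = set(string.punctuation)
--
-- noun_suffix = ["action", "age", "ance", "cy", "dom", "ee", "ence", "er", "hood", "ion", "ism", "ist", "ity", "ling", "ment", "ness", "or", "ry", "scape", "ship", "ty"]
--
-- verb_suffix = ["ate", "ify", "ise", "ize"]
--
-- adj_suffix = ["able", "ese", "ful", "i", "ian", "ible", "ic", "ish", "ive", "less", "ly", "ous"]
--
-- adv_suffix = ["ward", "wards", "wise"]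
--
-- def assign_unk(tok):
--     """
--     Assign unknown word tokens.
--
--     Params:
--     ----------
--     tok: str
--         The word token to check.
--
--     Returns:
--     ----------
--     : str
--         The Unknown tokens.
--     """
--     # Digits
--     if any(char.isdigit() for char in tok):
--         return "--unk_digit--"
--
--     # Punctuation
--     elif any(char in punct for char in tok):
--         return "--unk_punct--"
--
--     # Upper-case
--     elif any(char.isupper() for char in tok):
--         return "--unk_upper--"
--
--     # Nouns
--     elif any(tok.endswith(suffix) for suffix in noun_suffix):
--         return "--unk_noun--"
--
--     # Verbs
--     elif any(tok.endswith(suffix) for suffix in verb_suffix):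
--         return "--unk_verb--"
--
--     # Adjectives
--     elif any(tok.endswith(suffix) for suffix in adj_suffix):
--         return "--unk_adj--"
--
--     # Adverbs
--     elif any(tok.endswith(suffix) for suffix in adv_suffix):
--         return "--unk_adv--"
--
--     return "--unk--"
-- ===== SOURCE B (Python) =====
-- import string
--
-- punct = set(string.punctuation)
--
-- noun_suffix = ["action", "age", "ance", "cy", "dom", "ee", "ence", "er", "hood", "ion", "ism", "ist", "ity", "ling", "ment", "ness", "or", "ry", "scape", "ship", "ty"]
-- verb_suffix = ["ate", "ify", "ise", "ize"]
-- adj_suffix = ["able", "ese", "ful", "i", "ian", "ible", "ic", "ish", "ive", "less", "ly", "ous"]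
-- adv_suffix = ["ward", "wards", "wise"]
--
--
-- def assign_unk(tok):
--     # One combined pass over the characters instead of three independent scans.
--     has_digit = has_punct = has_upper = False
--     for char in tok:
--         if char.isdigit():
--             has_digit = True
--         if char in punct:
--             has_punct = True
--         if char.isupper():
--             has_upper = True
--         if has_digit and has_punct and has_upper:
--             break
--
--     if has_digit:
--         return "--unk_digit--"
--     if has_punct:
--         return "--unk_punct--"
--     if has_upper:
--         return "--unk_upper--"
--     if any(tok.endswith(suffix) for suffix in noun_suffix):
--         return "--unk_noun--"
--     if any(tok.endswith(suffix) for suffix in verb_suffix):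
--         return "--unk_verb--"
--     if any(tok.endswith(suffix) for suffix in adj_suffix):
--         return "--unk_adj--"
--     if any(tok.endswith(suffix) for suffix in adv_suffix):
--         return "--unk_adv--"
--     return "--unk--"
-- ===== Notes on version B (the rewrite author's own statement) =====
-- stated objective: faster
-- what changed: B replaces A's three independent any() generator scans of the token with a single early-exiting character loop that sets three feature flags, then runs the same priority cascade on those flags; the suffix checks are unchanged.
import Mathlib
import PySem

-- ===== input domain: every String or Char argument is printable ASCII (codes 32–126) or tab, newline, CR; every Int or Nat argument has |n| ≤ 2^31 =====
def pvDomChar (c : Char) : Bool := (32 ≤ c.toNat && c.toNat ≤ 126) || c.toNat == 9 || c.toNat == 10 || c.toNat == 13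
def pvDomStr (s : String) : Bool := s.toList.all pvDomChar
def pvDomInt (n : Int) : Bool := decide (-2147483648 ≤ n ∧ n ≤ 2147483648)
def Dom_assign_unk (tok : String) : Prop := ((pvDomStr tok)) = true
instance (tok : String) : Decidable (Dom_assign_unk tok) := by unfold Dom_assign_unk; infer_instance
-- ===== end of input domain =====

-- B merges A's three independent character scans into one early-exiting pass over the token
-- (objective: alternative decomposition, same cost); the suffix cascade is unchanged.

-- shared module-level constants (string.punctuation and the suffix lists)
def punctChars : List Char := "!\"#$%&'()*+,-./:;<=>?@[\\]^_`{|}~".toList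
def nounSuffix : List String := ["action", "age", "ance", "cy", "dom", "ee", "ence", "er", "hood", "ion", "ism", "ist", "ity", "ling", "ment", "ness", "or", "ry", "scape", "ship", "ty"]
def verbSuffix : List String := ["ate", "ify", "ise", "ize"]
def adjSuffix : List String := ["able", "ese", "ful", "i", "ian", "ible", "ic", "ish", "ive", "less", "ly", "ous"]
def advSuffix : List String := ["ward", "wards", "wise"]

-- ===== PORT A =====
def assign_unk (tok : String) : String :=
  if tok.toList.any (fun c => PySem.Chars.isdigit c) then "--unk_digit--"
  else if tok.toList.any (fun c => punctChars.contains c) then "--unk_punct--"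
  else if tok.toList.any (fun c => PySem.Chars.isupper c) then "--unk_upper--"
  else if nounSuffix.any (fun s => PySem.Str.endswith tok s) then "--unk_noun--"
  else if verbSuffix.any (fun s => PySem.Str.endswith tok s) then "--unk_verb--"
  else if adjSuffix.any (fun s => PySem.Str.endswith tok s) then "--unk_adj--"
  else if advSuffix.any (fun s => PySem.Str.endswith tok s) then "--unk_adv--"
  else "--unk--"

-- ===== PORT B =====
-- the single early-exiting pass of Source B: three flags over the characters
def scanFlags : List Char → Bool → Bool → Bool → Bool × Bool × Bool
  | [], d, p, u => (d, p, u)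
  | c :: cs, d, p, u =>
    let d' := d || PySem.Chars.isdigit c
    let p' := p || punctChars.contains c
    let u' := u || PySem.Chars.isupper c
    if d' && p' && u' then (d', p', u') else scanFlags cs d' p' u'

def assign_unk_alt (tok : String) : String :=
  let f := scanFlags tok.toList false false false
  if f.1 then "--unk_digit--"
  else if f.2.1 then "--unk_punct--"
  else if f.2.2 then "--unk_upper--"
  else if nounSuffix.any (fun s => PySem.Str.endswith tok s) then "--unk_noun--"
  else if verbSuffix.any (fun s => PySem.Str.endswith tok s) then "--unk_verb--"
  else if adjSuffix.any (fun s => PySem.Str.endswith tok s) then "--unk_adj--"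
  else if advSuffix.any (fun s => PySem.Str.endswith tok s) then "--unk_adv--"
  else "--unk--"

-- ===== PRECONDITION & SPEC =====
def Spec_assign_unk (tok : String) (out : String) : Prop := out = assign_unk_alt tok
instance (tok : String) (out : String) : Decidable (Spec_assign_unk tok out) := by unfold Spec_assign_unk; infer_instance

-- ===== CLAIM (what is proved, stated in full; the proofs are below) =====
def Claim_equal_assign_unk : Prop := ∀ (tok : String), Dom_assign_unk tok → Spec_assign_unk tok (assign_unk tok)

-- ===== LEMMAS AND PROOFS =====
theorem scanFlags_eq (cs : List Char) (d p u : Bool) :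
    scanFlags cs d p u =
      (d || cs.any (fun c => PySem.Chars.isdigit c),
       p || cs.any (fun c => punctChars.contains c),
       u || cs.any (fun c => PySem.Chars.isupper c)) := by
  induction cs generalizing d p u with
  | nil => simp [scanFlags]
  | cons c cs ih =>
    simp only [scanFlags, List.any_cons]
    split
    · rename_i h
      simp only [Bool.and_eq_true] at h
      obtain ⟨⟨hd, hp⟩, hu⟩ := h
      simp [← Bool.or_assoc, hd, hu]
      intro x _ _
      simpa using hp
    · rw [ih]
      simp [Bool.or_assoc]

-- ===== VERDICT (by name: the statement is the Claim_ definition above) =====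
theorem assign_unk_spec : Claim_equal_assign_unk := by
  intro tok _
  unfold Spec_assign_unk assign_unk assign_unk_alt
  rw [scanFlags_eq]
  simp
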